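-- pv_equiv track=rewrite | github.com/destifo/Competitive-Programming | 1657. Determine if Two Strings Are Close/CloseStrings.py | check
-- ===== SOURCE A (Python) =====
-- from collections import Counter, defaultdict
--
-- def check(word_count1, word_count2) -> bool:
--     count1, count2 = defaultdict(int), defaultdict(int)
--
--     for cnt in word_count1.values():
--         count1[cnt] += 1
--
--     for cnt in word_count2.values():
--         count2[cnt] += 1
--
--     for cnt in count1:
--         if count1[cnt] != count2[cnt]:
--             return False
--
--     for cnt in count2:
--         if count1[cnt] != count2[cnt]:
--             return False
--
--     return True
-- ===== SOURCE B (Python) =====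
-- def check(word_count1, word_count2) -> bool:
--     return sorted(word_count1.values()) == sorted(word_count2.values())
-- ===== Notes on version B (the rewrite author's own statement) =====
-- stated objective: simpler
-- what changed: Replaces the two frequency-of-frequency defaultdicts and the two key-comparison loops with a single sort-then-compare multiset-equality test on the value lists.
import Mathlib
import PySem

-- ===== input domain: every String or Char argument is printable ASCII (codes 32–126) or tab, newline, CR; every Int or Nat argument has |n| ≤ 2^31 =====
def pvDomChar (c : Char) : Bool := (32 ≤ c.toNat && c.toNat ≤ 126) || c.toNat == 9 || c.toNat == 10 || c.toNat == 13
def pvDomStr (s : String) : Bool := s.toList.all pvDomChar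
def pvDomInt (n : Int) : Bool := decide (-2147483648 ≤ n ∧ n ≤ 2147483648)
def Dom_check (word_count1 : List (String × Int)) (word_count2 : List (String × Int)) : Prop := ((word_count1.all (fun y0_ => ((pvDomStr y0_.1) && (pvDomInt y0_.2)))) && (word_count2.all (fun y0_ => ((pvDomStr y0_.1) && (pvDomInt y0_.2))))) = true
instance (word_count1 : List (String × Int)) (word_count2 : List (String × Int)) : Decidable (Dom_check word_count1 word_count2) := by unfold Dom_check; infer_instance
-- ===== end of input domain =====

-- B replaces A's two frequency-of-frequency tables and its two comparison loops by
-- sorting the two value lists and comparing them elementwise (objective: simpler).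


-- ===== PORT A =====
-- count1/count2 are defaultdict(int); the `+= 1` loops are folds of insert/getD.
-- The two comparison loops iterate the dicts' keys and short-circuit on the first
-- mismatch (List.all short-circuits the same way).  Reading count2[cnt] in loop 3
-- (resp. count1[cnt] in loop 4) on a defaultdict inserts the missing key with
-- value 0; such an insertion happens only at the very comparison that returns
-- False (counter values are never 0), so it never changes any compared value nor
-- the key list loop 4 actually iterates; the port reads getD _ 0 instead.
def pyCountLoop (vals : List Int) : PySem.Dict Int Int :=
  vals.foldl (fun d cnt => d.insert cnt (d.getD cnt 0 + 1)) PySem.Dict.empty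

def check (word_count1 : List (String × Int)) (word_count2 : List (String × Int)) : Bool :=
  let count1 := pyCountLoop ((PySem.Dict.ofList word_count1).values)
  let count2 := pyCountLoop ((PySem.Dict.ofList word_count2).values)
  count1.keys.all (fun cnt => count1.getD cnt 0 == count2.getD cnt 0) &&
  count2.keys.all (fun cnt => count1.getD cnt 0 == count2.getD cnt 0)

-- ===== PORT B =====
def check_alt (word_count1 : List (String × Int)) (word_count2 : List (String × Int)) : Bool :=
  PySem.List.sorted ((PySem.Dict.ofList word_count1).values) (fun v => v) ==
  PySem.List.sorted ((PySem.Dict.ofList word_count2).values) (fun v => v)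

-- ===== PRECONDITION & SPEC =====
def Spec_check (word_count1 : List (String × Int)) (word_count2 : List (String × Int)) (out : Bool) : Prop := out = check_alt word_count1 word_count2
instance (word_count1 : List (String × Int)) (word_count2 : List (String × Int)) (out : Bool) : Decidable (Spec_check word_count1 word_count2 out) := by unfold Spec_check; infer_instance

-- ===== CLAIM (what is proved, stated in full; the proofs are below) =====
def Claim_equal_check : Prop := ∀ (word_count1 : List (String × Int)) (word_count2 : List (String × Int)), Dom_check word_count1 word_count2 → Spec_check word_count1 word_count2 (check word_count1 word_count2)

-- ===== LEMMAS AND PROOFS =====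

-- A's result (on any two value lists) is true iff every value occurring in either
-- list occurs equally often in both, i.e. iff the lists are permutations.
theorem pv_counterSide_iff (v1 v2 : List Int) :
    ((PySem.Dict.counter v1).keys.all
        (fun cnt => (PySem.Dict.counter v1).getD cnt 0 == (PySem.Dict.counter v2).getD cnt 0) &&
     (PySem.Dict.counter v2).keys.all
        (fun cnt => (PySem.Dict.counter v1).getD cnt 0 == (PySem.Dict.counter v2).getD cnt 0)) = true
    ↔ v1.Perm v2 := by
  rw [List.perm_iff_count]
  simp only [Bool.and_eq_true, List.all_eq_true, PySem.Dict.keys_counter,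
    PySem.Set.mem_ofList, PySem.Dict.getD_counter, beq_iff_eq, Int.natCast_inj]
  constructor
  · rintro ⟨h1, h2⟩ c
    by_cases hc1 : c ∈ v1
    · exact h1 c hc1
    · by_cases hc2 : c ∈ v2
      · exact h2 c hc2
      · simp [List.count_eq_zero_of_not_mem, hc1, hc2]
  · intro h
    exact ⟨fun c _ => h c, fun c _ => h c⟩

-- B's result is true iff the two value lists are permutations.
theorem pv_sortedSide_iff (v1 v2 : List Int) :
    (PySem.List.sorted v1 (fun v => v) == PySem.List.sorted v2 (fun v => v)) = true
    ↔ v1.Perm v2 := by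
  rw [beq_iff_eq]
  constructor
  · intro h
    exact ((PySem.List.sorted_perm v1 (fun v => v) false).symm.trans
      (h ▸ PySem.List.sorted_perm v2 (fun v => v) false))
  · intro h
    exact List.Perm.eq_of_pairwise (fun _ _ _ _ hab hba => le_antisymm hab hba)
      (PySem.List.sorted_pairwise v1 (fun v => v))
      (PySem.List.sorted_pairwise v2 (fun v => v))
      ((PySem.List.sorted_perm v1 (fun v => v) false).trans
        (h.trans (PySem.List.sorted_perm v2 (fun v => v) false).symm))

-- ===== VERDICT (by name: the statement is the Claim_ definition above) =====
theorem check_spec : Claim_equal_check := by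
  intro wc1 wc2 _
  unfold Spec_check check check_alt
  dsimp only
  have hc : ∀ (v : List Int), pyCountLoop v = PySem.Dict.counter v :=
    fun v => PySem.Dict.foldl_insert_getD_add_one_eq_counter v
  rw [hc, hc, Bool.eq_iff_iff, pv_counterSide_iff, pv_sortedSide_iff]
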